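-- pv_equiv track=rewrite | github.com/hyoeun98/boj | 프로그래머스/lv4/118670. 행렬과 연산/행렬과 연산.py | solution
-- ===== SOURCE A (Python) =====
-- from collections import deque
--
-- def solution(rc, operations):
--     answer = []
--     mid, left, right = deque(), deque(), deque()
--     for r in rc:
--         mid.append(deque(r[1:-1]))
--         left.append(r[0])
--         right.append(r[-1])
--
--     for op in operations:
--         if op == "Rotate":
--             if mid[0]:
--                 right.appendleft(mid[0].pop())
--                 mid[-1].append(right.pop())
--             else:
--                 right.appendleft(left.popleft())
--
--             if mid[-1]:
--                 left.append(mid[-1].popleft())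
--                 mid[0].appendleft(left.popleft())
--             else:
--                 left.append(right.pop())
--
--         else: # ShiftRow
--             mid.rotate(1)
--             left.rotate(1)
--             right.rotate(1)
--
--     for m ,l ,r in zip(mid, left, right):
--         answer.append([l] + list(m) + [r])
--     return answer
-- ===== SOURCE B (Python) =====
-- def solution(rc, operations):
--     rows = [list(r) for r in rc]
--     for op in operations:
--         if op == "Rotate":
--             n = len(rows)
--             new = [[rows[1][0]] + rows[0][:-1]]
--             for i in range(1, n - 1):
--                 new.append([rows[i + 1][0]] + rows[i][1:-1] + [rows[i - 1][-1]])
--             new.append(rows[-1][1:] + [rows[-2][-1]])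
--             rows = new
--         else:  # ShiftRow
--             rows = rows[-1:] + rows[:-1]
--     return rows
-- ===== Notes on version B (the rewrite author's own statement) =====
-- stated objective: alternative
-- what changed: B keeps the whole matrix as a list of rows and implements Rotate by rebuilding each row of the border ring directly (new top/middle/bottom rows from their neighbours) and ShiftRow by rotating the list of rows, instead of A's three-deque left/mid/right decomposition with corner hand-offs between deques.
-- outside the precondition, e.g. on solution([[5]], ['Rotate']): A returns [[5, 5]], B raises IndexError; on solution([[1, 2, 3]], ['Rotate']): A returns [[3, 1, 2]], B raises IndexError; on solution([[1], [2]], ['Rotate']): A returns [[2, 1], [2, 1]], B returns [[2], [1]]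
import Mathlib
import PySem

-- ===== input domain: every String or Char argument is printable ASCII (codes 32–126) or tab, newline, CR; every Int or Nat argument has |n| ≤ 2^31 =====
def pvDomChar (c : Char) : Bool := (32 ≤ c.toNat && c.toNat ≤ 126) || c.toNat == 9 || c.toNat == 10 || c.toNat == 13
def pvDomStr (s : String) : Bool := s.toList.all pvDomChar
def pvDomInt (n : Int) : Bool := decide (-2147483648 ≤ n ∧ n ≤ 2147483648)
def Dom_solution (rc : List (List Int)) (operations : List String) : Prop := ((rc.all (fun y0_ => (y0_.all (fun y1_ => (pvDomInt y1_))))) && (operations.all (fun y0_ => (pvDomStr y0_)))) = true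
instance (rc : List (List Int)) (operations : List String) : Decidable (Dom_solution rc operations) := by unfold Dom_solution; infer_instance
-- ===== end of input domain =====

-- B re-implements the operations on the whole matrix (rebuilding the border ring rows / rotating the
-- list of rows) instead of A's three-deque left/mid/right decomposition; objective: alternative.

-- ===== PORT A =====
-- deque.rotate(1): last element to the front (no-op on the empty deque)
def pyDequeRotate1 {α : Type} (xs : List α) : List α :=
  match xs.getLast? with
  | none => xs
  | some x => x :: xs.dropLast

-- one iteration of A's `for r in rc` loop: mid/left/right grow by one entry
def initStepA (s : List (List Int) × List Int × List Int) (r : List Int) :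
    List (List Int) × List Int × List Int :=
  (s.1 ++ [PySem.List.slice r (some 1) (some (-1))],
   s.2.1 ++ [PySem.List.pyGetD r 0 0],
   s.2.2 ++ [PySem.List.pyGetD r (-1) 0])

-- one iteration of A's `for op in operations` loop (deque ops on the three lists)
def stepA (s : List (List Int) × List Int × List Int) (op : String) :
    List (List Int) × List Int × List Int :=
  let mid := s.1
  let left := s.2.1
  let right := s.2.2
  if op = "Rotate" then
    -- first if: mid[0] nonempty?
    let t :=
      if mid.headD [] ≠ [] then
        let right := (mid.headD []).getLastD 0 :: right            -- right.appendleft(mid[0].pop())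
        let mid := (mid.headD []).dropLast :: mid.tail
        let mid := mid.dropLast ++ [mid.getLastD [] ++ [right.getLastD 0]]  -- mid[-1].append(right.pop())
        let right := right.dropLast
        (mid, left, right)
      else
        (mid, left.tail, left.headD 0 :: right)                    -- right.appendleft(left.popleft())
    let mid := t.1
    let left := t.2.1
    let right := t.2.2
    -- second if: mid[-1] nonempty?
    if mid.getLastD [] ≠ [] then
      let left := left ++ [(mid.getLastD []).headD 0]              -- left.append(mid[-1].popleft())
      let mid := mid.dropLast ++ [(mid.getLastD []).tail]
      let mid := (left.headD 0 :: mid.headD []) :: mid.tail        -- mid[0].appendleft(left.popleft())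
      let left := left.tail
      (mid, left, right)
    else
      (mid, left ++ [right.getLastD 0], right.dropLast)            -- left.append(right.pop())
  else
    (pyDequeRotate1 mid, pyDequeRotate1 left, pyDequeRotate1 right)

def solution (rc : List (List Int)) (operations : List String) : List (List Int) :=
  let s0 := rc.foldl initStepA ([], [], [])
  let st := operations.foldl stepA s0
  (st.1.zip (st.2.1.zip st.2.2)).map (fun p => p.2.1 :: p.1 ++ [p.2.2])

-- ===== PORT B =====
-- one iteration of B's `for op in operations` loop, on the whole matrix
def stepB (rows : List (List Int)) (op : String) : List (List Int) :=
  if op = "Rotate" then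
    let n : Int := rows.length
    let new := [PySem.List.pyGetD (PySem.List.pyGetD rows 1 []) 0 0 :: (PySem.List.pyGetD rows 0 []).dropLast]
    let new := (PySem.List.pyRange 1 (n - 1) 1).foldl (fun acc i =>
      acc ++ [PySem.List.pyGetD (PySem.List.pyGetD rows (i + 1) []) 0 0 ::
              PySem.List.slice (PySem.List.pyGetD rows i []) (some 1) (some (-1)) ++
              [PySem.List.pyGetD (PySem.List.pyGetD rows (i - 1) []) (-1) 0]]) new
    new ++ [(PySem.List.pyGetD rows (-1) []).tail ++
            [PySem.List.pyGetD (PySem.List.pyGetD rows (-2) []) (-1) 0]]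
  else
    PySem.List.slice rows (some (-1)) none ++ PySem.List.slice rows none (some (-1))

def solution_alt (rc : List (List Int)) (operations : List String) : List (List Int) :=
  operations.foldl stepB (rc.map id)

-- ===== PRECONDITION & SPEC =====
-- Pre_ admits the problem's natural domain — rectangular matrices with at least 2 rows and 2
-- columns — plus any matrix whose rows all have length ≥ 2 when no "Rotate" is performed.
-- Excluded shapes on which A still returns (single row/column, ragged rows, rotated) get accidental
-- values from A's left/mid/right decomposition (duplicated cells, rows dropped by the final zip),
-- which B's whole-matrix form does not reproduce.
def Pre_solution (rc : List (List Int)) (operations : List String) : Prop :=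
  (∀ r ∈ rc, 2 ≤ r.length) ∧
    ((2 ≤ rc.length ∧ ∀ r ∈ rc, r.length = (rc.headD []).length) ∨ "Rotate" ∉ operations)
instance (rc : List (List Int)) (operations : List String) : Decidable (Pre_solution rc operations) := by
  unfold Pre_solution; infer_instance

def pvWitness_solution : List (List Int) × List String :=
  ([[1, 2, 3], [4, 5, 6], [7, 8, 9]], ["Rotate", "ShiftRow", "Rotate"])

def Spec_solution (rc : List (List Int)) (operations : List String) (out : List (List Int)) : Prop := out = solution_alt rc operations
instance (rc : List (List Int)) (operations : List String) (out : List (List Int)) : Decidable (Spec_solution rc operations out) := by unfold Spec_solution; infer_instance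

-- ===== CLAIM (what is proved, stated in full; the proofs are below) =====
def Claim_equal_solution : Prop := ∀ (rc : List (List Int)) (operations : List String), Dom_solution rc operations → Pre_solution rc operations → Spec_solution rc operations (solution rc operations)

-- ===== LEMMAS AND PROOFS =====

-- proof-side abbreviations for the three projections of a row
def innF (r : List Int) : List Int := r.tail.dropLast
def hdF (r : List Int) : Int := r.headD 0
def lstF (r : List Int) : Int := r.getLastD 0

@[simp] theorem slice_innF (r : List Int) : PySem.List.slice r (some 1) (some (-1)) = innF r := by
  cases r with
  | nil => simp [PySem.List.slice, innF]
  | cons a t =>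
      simp [PySem.List.slice, PySem.List.clampIdx, List.dropLast_eq_take, innF]
      split_ifs <;> omega

@[simp] theorem pyGetD_zero_headD {α : Type} (r : List α) (d : α) :
    PySem.List.pyGetD r 0 d = r.headD d := by
  cases r <;> simp [PySem.List.pyGetD, PySem.List.pyGet?, PySem.List.pyIdx?]

@[simp] theorem pyGetD_neg_one_getLastD {α : Type} (r : List α) (d : α) :
    PySem.List.pyGetD r (-1) d = r.getLastD d := by
  cases r with
  | nil => simp [PySem.List.pyGetD, PySem.List.pyGet?, PySem.List.pyIdx?]
  | cons a t =>
      rw [PySem.List.pyGetD_neg_one (a :: t) d (by simp)]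
      simp [List.getLastD_eq_getLast?, List.getLast?_eq_some_getLast (l := a :: t) (by simp)]

theorem pyGetD_neg_two {α : Type} (r : List α) (d : α) (h : 2 ≤ r.length) :
    PySem.List.pyGetD r (-2) d = r.dropLast.getLastD d := by
  rw [PySem.List.pyGetD_neg_ofNat r 2 d (by omega) h]
  rw [List.getLastD_eq_getLast?, List.getLast?_eq_some_getLast (l := r.dropLast)
    (by intro hh; have := congrArg List.length hh; simp at this; omega)]
  simp only [Option.getD_some, List.getLast_eq_getElem, List.getElem_dropLast, List.length_dropLast]
  exact getElem_congr rfl (by omega) (by omega)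

theorem init_eq (rc : List (List Int)) :
    ∀ acc : List (List Int) × List Int × List Int,
      rc.foldl initStepA acc =
        (acc.1 ++ rc.map innF, acc.2.1 ++ rc.map hdF, acc.2.2 ++ rc.map lstF) := by
  induction rc with
  | nil => intro acc; simp
  | cons r t ih =>
      intro acc
      simp only [List.foldl_cons, ih, initStepA, List.map_cons]
      simp [hdF, lstF, List.headD_eq_head?, List.getLastD_eq_getLast?]

theorem recomb (rows : List (List Int)) (hs : ∀ r ∈ rows, 2 ≤ r.length) :
    ((rows.map innF).zip ((rows.map hdF).zip (rows.map lstF))).map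
        (fun p => p.2.1 :: p.1 ++ [p.2.2]) = rows := by
  induction rows with
  | nil => simp
  | cons r t ih =>
      simp only [List.map_cons, List.zip_cons_cons, List.mem_cons] at *
      rw [ih (fun x hx => hs x (Or.inr hx))]
      have hr : 2 ≤ r.length := hs r (Or.inl rfl)
      cases r with
      | nil => simp at hr
      | cons a s =>
          have hsne : s ≠ [] := by intro h; subst h; simp at hr
          simp [innF, hdF, lstF, List.getLastD_eq_getLast?,
            List.getLast?_eq_some_getLast (l := a :: s) (by simp),
            List.getLast_cons hsne, List.dropLast_append_getLast hsne]

theorem bridgeM {β : Type} (xs : List (List Int)) (g : List Int → β) (c : Int)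
    (hc0 : 0 ≤ 1 + c) (hc1 : c ≤ 1) (h2 : 2 ≤ xs.length) :
    (PySem.List.pyRange 1 ((xs.length : Int) - 1) 1).map
        (fun i => g (PySem.List.pyGetD xs (i + c) [])) =
      ((xs.drop (1 + c).toNat).take (xs.length - 2)).map g := by
  rw [PySem.List.pyRange_one]
  rw [List.map_map]
  apply List.ext_getElem
  · simp; omega
  · intro k h1 h2'
    simp only [List.length_map, List.length_range, List.length_take, List.length_drop] at h1 h2'
    simp only [List.getElem_map, List.getElem_range, Function.comp_apply, List.getElem_take,
      List.getElem_drop]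
    rw [PySem.List.pyGetD_eq_getElem xs [] (by omega) (by push_cast; omega)]
    have : (1 + (k:Int) + c).toNat = (1 + c).toNat + k := by omega
    exact congrArg g (getElem_congr rfl this (by omega))

theorem stepB_rotate (rows : List (List Int)) :
    stepB rows "Rotate" =
      ((rows.getD 1 []).headD 0 :: (rows.headD []).dropLast) ::
        ((PySem.List.pyRange 1 ((rows.length : Int) - 1) 1).map (fun i =>
          (PySem.List.pyGetD rows (i + 1) []).headD 0 ::
            innF (PySem.List.pyGetD rows i []) ++
            [(PySem.List.pyGetD rows (i - 1) []).getLastD 0]) ++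
        [(rows.getLastD []).tail ++ [(PySem.List.pyGetD rows (-2) []).getLastD 0]]) := by
  simp only [stepB, if_pos rfl, PySem.List.foldl_append_singleton_eq_map,
    slice_innF, pyGetD_zero_headD, pyGetD_neg_one_getLastD, PySem.List.pyGetD_ofNat']
  simp [List.head?_eq_getElem?]

theorem bridge0 {β : Type} (xs : List (List Int)) (g : List Int → β) (h2 : 2 ≤ xs.length) :
    (PySem.List.pyRange 1 ((xs.length : Int) - 1) 1).map
        (fun i => g (PySem.List.pyGetD xs i [])) =
      ((xs.drop 1).take (xs.length - 2)).map g := by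
  have := bridgeM xs g 0 (by omega) (by omega) h2
  simpa using this

theorem bridge1 {β : Type} (xs : List (List Int)) (g : List Int → β) (h2 : 2 ≤ xs.length) :
    (PySem.List.pyRange 1 ((xs.length : Int) - 1) 1).map
        (fun i => g (PySem.List.pyGetD xs (i + 1) [])) =
      ((xs.drop 2).take (xs.length - 2)).map g := by
  have := bridgeM xs g 1 (by omega) (by omega) h2
  simpa using this

theorem bridgeN1 {β : Type} (xs : List (List Int)) (g : List Int → β) (h2 : 2 ≤ xs.length) :
    (PySem.List.pyRange 1 ((xs.length : Int) - 1) 1).map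
        (fun i => g (PySem.List.pyGetD xs (i - 1) [])) =
      (xs.take (xs.length - 2)).map g := by
  have := bridgeM xs g (-1) (by omega) (by omega) h2
  simp only [show (1 + (-1 : Int)) = 0 by norm_num, Int.toNat_zero, List.drop_zero] at this
  rw [← this]
  apply List.map_congr_left
  intro i _
  norm_num [sub_eq_add_neg]

-- headD/getLastD of a map over a nonempty list
theorem map_eq_headD_cons {α β : Type} (f : α → β) (l : List α) (h : l ≠ []) (d : α) :
    l.map f = f (l.headD d) :: l.tail.map f := by
  cases l with
  | nil => exact absurd rfl h
  | cons a t => rfl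

theorem map_eq_dropLast_concat {α β : Type} (f : α → β) (l : List α) (h : l ≠ []) (d : α) :
    l.map f = l.dropLast.map f ++ [f (l.getLastD d)] := by
  induction l generalizing d with
  | nil => exact absurd rfl h
  | cons a t ih =>
      cases t with
      | nil => rfl
      | cons b s =>
          rw [List.dropLast_cons₂, List.getLastD_cons, List.map_cons,
            ih (by simp) b, List.map_cons]
          simp [List.getLastD_eq_getLast?, List.getLast?_eq_some_getLast (l := b :: s) (by simp)]

theorem getLastD_ne_nil {α : Type} (l : List α) (h : l ≠ []) (d d' : α) :
    l.getLastD d = l.getLastD d' := by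
  rw [List.getLastD_eq_getLast?, List.getLastD_eq_getLast?,
    List.getLast?_eq_some_getLast (l := l) h]
  rfl

theorem getLastD_cons_ne_nil {α : Type} (a : α) (l : List α) (h : l ≠ []) (d : α) :
    (a :: l).getLastD d = l.getLastD d := by
  rw [List.getLastD_cons]
  exact getLastD_ne_nil l h a d

theorem tail_getLastD {α : Type} (l : List α) (h : l.tail ≠ []) (d : α) :
    l.tail.getLastD d = l.getLastD d := by
  cases l with
  | nil => rfl
  | cons a t => rw [List.tail_cons, getLastD_cons_ne_nil a t h d]

theorem dropLast_headD {α : Type} (l : List α) (h : l.dropLast ≠ []) (d : α) :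
    l.dropLast.headD d = l.headD d := by
  cases l with
  | nil => rfl
  | cons a t =>
      cases t with
      | nil => exact absurd rfl h
      | cons b s => rfl

theorem tail_dropLast_concat {α : Type} (l : List α) (h : 2 ≤ l.length) (d : α) :
    l.dropLast.tail ++ [l.getLastD d] = l.tail := by
  cases l with
  | nil => simp at h
  | cons a t =>
      have ht : t ≠ [] := by intro hh; subst hh; simp at h
      simp only [List.getLastD_cons, List.tail_cons,
        List.dropLast_cons_of_ne_nil ht]
      rw [getLastD_ne_nil t ht a d, List.getLastD_eq_getLast?,
        List.getLast?_eq_some_getLast (l := t) ht]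
      simp [List.dropLast_append_getLast ht]

theorem headD_append_ne_nil {α : Type} (X : List α) (z : α) (h : X ≠ []) (d : α) :
    (X ++ [z]).headD d = X.headD d := by
  cases X with
  | nil => exact absurd rfl h
  | cons a t => rfl

theorem len2_tail_headD (r : List Int) (h : r.length = 2) : r.tail.headD 0 = r.getLastD 0 := by
  match r, h with | [a, b], _ => rfl

theorem len2_dropLast_getLastD (r : List Int) (h : r.length = 2) (q : Int) :
    r.dropLast.getLastD q = r.headD 0 := by
  match r, h with | [a, b], _ => rfl

theorem len2_nil (r : List Int) (h : r.length = 2) : r.tail.dropLast = [] := by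
  match r, h with | [a, b], _ => rfl

theorem lstF_cons_concat (x : Int) (l : List Int) (y : Int) : lstF (x :: l ++ [y]) = y := by
  rw [lstF, List.getLastD_eq_getLast?,
    show (x :: l ++ [y]).getLast? = some y from List.getLast?_concat]
  rfl

theorem innF_cons_concat (x : Int) (l : List Int) (y : Int) : innF (x :: l ++ [y]) = l := by
  simp [innF]

theorem stepB_map_hdF (r0 rl : List Int) (mrs : List (List Int)) (hrl : 2 ≤ rl.length) :
    (stepB (r0 :: mrs ++ [rl]) "Rotate").map hdF =
      hdF ((mrs ++ [rl]).headD []) :: (mrs ++ [rl]).tail.map hdF ++ [rl.tail.headD 0] := by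
  rw [stepB_rotate]
  simp only [List.map_cons, List.map_append, List.map_map, List.map_cons, List.map_nil]
  rw [List.map_congr_left (fun i _ => by
    simp [hdF] : ∀ i ∈ PySem.List.pyRange 1 (((r0 :: mrs ++ [rl]).length : Int) - 1) 1,
      (hdF ∘ fun i =>
        (PySem.List.pyGetD (r0 :: mrs ++ [rl]) (i + 1) []).headD 0 ::
          innF (PySem.List.pyGetD (r0 :: mrs ++ [rl]) i []) ++
          [(PySem.List.pyGetD (r0 :: mrs ++ [rl]) (i - 1) []).getLastD 0]) i =
      (fun i => (fun r => r.headD 0) (PySem.List.pyGetD (r0 :: mrs ++ [rl]) (i + 1) [])) i)]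
  rw [bridge1 (r0 :: mrs ++ [rl]) (fun r => r.headD 0) (by simp)]
  have h1 : ((r0 :: mrs ++ [rl]).drop 2).take ((r0 :: mrs ++ [rl]).length - 2) =
      (mrs ++ [rl]).tail := by
    have : (r0 :: mrs ++ [rl]).drop 2 = (mrs ++ [rl]).tail := by simp [List.drop_drop]
    rw [this]
    apply List.take_of_length_le
    simp
  rw [h1]
  have h2 : (r0 :: mrs ++ [rl]).getD 1 [] = (mrs ++ [rl]).headD [] := by
    cases mrs <;> simp
  have h3 : (r0 :: mrs ++ [rl]).getLastD [] = rl := by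
    rw [List.getLastD_eq_getLast?]
    rw [show r0 :: mrs ++ [rl] = (r0 :: mrs) ++ [rl] by simp]
    rw [List.getLast?_concat]
    rfl
  rw [h2, h3]
  have h4 : (rl.tail ++ [(PySem.List.pyGetD (r0 :: mrs ++ [rl]) (-2) []).getLastD 0]).headD 0 =
      rl.tail.headD 0 :=
    headD_append_ne_nil _ _ (by intro hh; have := congrArg List.length hh; simp at this; omega) 0
  simp only [hdF]
  rw [h4]
  simp only [List.headD_cons]
  rfl

theorem stepB_map_lstF (r0 rl : List Int) (mrs : List (List Int)) (hr0 : 2 ≤ r0.length) :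
    (stepB (r0 :: mrs ++ [rl]) "Rotate").map lstF =
      r0.dropLast.getLastD 0 :: (r0 :: mrs).dropLast.map lstF ++
        [lstF ((r0 :: mrs).getLastD [])] := by
  rw [stepB_rotate]
  simp only [List.map_cons, List.map_append, List.map_map, List.map_nil]
  have hcongr : ∀ i ∈ PySem.List.pyRange 1 (((r0 :: mrs ++ [rl]).length : Int) - 1) 1,
      (lstF ∘ fun i =>
        (PySem.List.pyGetD (r0 :: mrs ++ [rl]) (i + 1) []).headD 0 ::
          innF (PySem.List.pyGetD (r0 :: mrs ++ [rl]) i []) ++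
          [(PySem.List.pyGetD (r0 :: mrs ++ [rl]) (i - 1) []).getLastD 0]) i =
      (fun i => (fun r => r.getLastD 0) (PySem.List.pyGetD (r0 :: mrs ++ [rl]) (i - 1) [])) i := by
    intro i _
    simp only [Function.comp_apply]
    exact lstF_cons_concat _ _ _
  rw [List.map_congr_left hcongr]
  rw [bridgeN1 (r0 :: mrs ++ [rl]) (fun r => r.getLastD 0) (by simp)]
  have h1 : (r0 :: mrs ++ [rl]).take ((r0 :: mrs ++ [rl]).length - 2) = (r0 :: mrs).dropLast := by
    rw [show r0 :: mrs ++ [rl] = (r0 :: mrs) ++ [rl] by simp]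
    rw [show ((r0 :: mrs) ++ [rl]).length - 2 = (r0 :: mrs).length - 1 by simp]
    rw [List.take_append_of_le_length (by simp)]
    rw [List.dropLast_eq_take]
  rw [h1]
  have hz : PySem.List.pyGetD (r0 :: mrs ++ [rl]) (-2) [] = (r0 :: mrs).getLastD [] := by
    rw [pyGetD_neg_two _ _ (by simp)]
    rw [show r0 :: mrs ++ [rl] = (r0 :: mrs) ++ [rl] by simp, List.dropLast_concat]
  rw [hz]
  have h2 : lstF (((r0 :: mrs ++ [rl]).getD 1 []).headD 0 :: ((r0 :: mrs ++ [rl]).headD []).dropLast) =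
      r0.dropLast.getLastD 0 := by
    rw [lstF, List.getLastD_cons]
    exact getLastD_ne_nil _ (by intro hh; have := congrArg List.length hh; simp at this; omega) _ _
  have h3 : lstF (((r0 :: mrs ++ [rl]).getLastD []).tail ++ [((r0 :: mrs).getLastD []).getLastD 0]) =
      lstF ((r0 :: mrs).getLastD []) := by
    rw [lstF, List.getLastD_eq_getLast?, List.getLast?_concat]
    rfl
  rw [h2, h3]
  rfl

theorem stepB_map_innF (r0 rl : List Int) (mrs : List (List Int)) :
    (stepB (r0 :: mrs ++ [rl]) "Rotate").map innF =
      r0.dropLast.dropLast :: mrs.map innF ++ [rl.tail.tail] := by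
  rw [stepB_rotate]
  simp only [List.map_cons, List.map_append, List.map_map, List.map_nil]
  rw [List.map_congr_left (fun i _ => by
    simp only [Function.comp_apply]; exact innF_cons_concat _ _ _ :
      ∀ i ∈ PySem.List.pyRange 1 (((r0 :: mrs ++ [rl]).length : Int) - 1) 1,
      (innF ∘ fun i =>
        (PySem.List.pyGetD (r0 :: mrs ++ [rl]) (i + 1) []).headD 0 ::
          innF (PySem.List.pyGetD (r0 :: mrs ++ [rl]) i []) ++
          [(PySem.List.pyGetD (r0 :: mrs ++ [rl]) (i - 1) []).getLastD 0]) i =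
      (fun i => innF (PySem.List.pyGetD (r0 :: mrs ++ [rl]) i [])) i)]
  rw [bridge0 (r0 :: mrs ++ [rl]) innF (by simp)]
  have h1 : ((r0 :: mrs ++ [rl]).drop 1).take ((r0 :: mrs ++ [rl]).length - 2) = mrs := by
    rw [show (r0 :: mrs ++ [rl]).drop 1 = mrs ++ [rl] from rfl]
    rw [show (r0 :: mrs ++ [rl]).length - 2 = mrs.length by simp]
    exact List.take_left
  rw [h1]
  have h3 : (r0 :: mrs ++ [rl]).getLastD [] = rl := by
    rw [List.getLastD_eq_getLast?]
    rw [show r0 :: mrs ++ [rl] = (r0 :: mrs) ++ [rl] by simp]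
    rw [List.getLast?_concat]
    rfl
  rw [h3]
  have h4 : innF (rl.tail ++ [(PySem.List.pyGetD (r0 :: mrs ++ [rl]) (-2) []).getLastD 0]) =
      rl.tail.tail := by
    rw [innF, ← List.tail_dropLast, List.dropLast_concat]
  rw [h4]
  have h2 : innF (((r0 :: mrs ++ [rl]).getD 1 []).headD 0 :: ((r0 :: mrs ++ [rl]).headD []).dropLast) =
      r0.dropLast.dropLast := by
    simp [innF]
  rw [h2]
  simp

theorem dropLast_cons_concat {α : Type} (x : α) (X : List α) (y : α) :
    (x :: (X ++ [y])).dropLast = x :: X := by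
  rw [← List.cons_append, List.dropLast_concat]

theorem getLastD_cons_concat {α : Type} (x : α) (X : List α) (y : α) (d : α) :
    (x :: (X ++ [y])).getLastD d = y := by
  rw [← List.cons_append, List.getLastD_eq_getLast?, List.getLast?_concat]
  rfl

theorem getLastD_concat' {α : Type} (X : List α) (y d : α) : (X ++ [y]).getLastD d = y := by
  rw [List.getLastD_eq_getLast?, List.getLast?_concat]
  rfl

theorem tail_append_ne_nil {α : Type} (X : List α) (y : List α) (h : X ≠ []) :
    (X ++ y).tail = X.tail ++ y := by
  cases X with
  | nil => exact absurd rfl h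
  | cons a t => rfl

theorem rowA (r : List Int) (h : 3 ≤ r.length) :
    hdF r :: (innF r).dropLast = r.dropLast.dropLast := by
  cases r with
  | nil => simp at h
  | cons a t =>
      simp only [List.length_cons] at h
      have ht : t ≠ [] := by intro hh; subst hh; simp at h
      have ht2 : t.dropLast ≠ [] := by
        intro hh; have := congrArg List.length hh; simp at this; omega
      rw [hdF, innF, List.headD_cons, List.tail_cons,
        List.dropLast_cons_of_ne_nil ht, List.dropLast_cons_of_ne_nil ht2]

theorem rowB (r : List Int) (h : 3 ≤ r.length) :
    (innF r).tail ++ [lstF r] = r.tail.tail := by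
  have h2 : 2 ≤ r.tail.length := by simp; omega
  have hne : r.tail ≠ [] := by
    intro hh; have := congrArg List.length hh; simp at this; omega
  rw [innF, lstF, ← tail_getLastD r hne 0]
  exact tail_dropLast_concat r.tail h2 0

theorem rowD (r : List Int) (h : 3 ≤ r.length) :
    (innF r).headD 0 = r.tail.headD 0 := by
  rw [innF]
  exact dropLast_headD r.tail
    (by intro hh; have := congrArg List.length hh; simp at this; omega) 0

theorem rowE (r : List Int) (h : 3 ≤ r.length) :
    (innF r).getLastD 0 = r.dropLast.getLastD 0 := by
  rw [innF, ← List.tail_dropLast]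
  exact tail_getLastD r.dropLast
    (by intro hh; have := congrArg List.length hh; simp at this; omega) 0

theorem stepA_rotate_big (m : Nat) (r0 rl : List Int) (mrs : List (List Int))
    (hm : 3 ≤ m) (h0 : r0.length = m) (hl : rl.length = m) :
    stepA (((r0 :: mrs ++ [rl]).map innF), ((r0 :: mrs ++ [rl]).map hdF),
        ((r0 :: mrs ++ [rl]).map lstF)) "Rotate" =
      (r0.dropLast.dropLast :: mrs.map innF ++ [rl.tail.tail],
       hdF ((mrs ++ [rl]).headD []) :: (mrs ++ [rl]).tail.map hdF ++ [rl.tail.headD 0],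
       r0.dropLast.getLastD 0 :: (r0 :: mrs).dropLast.map lstF ++ [lstF ((r0 :: mrs).getLastD [])]) := by
  have hinn : innF r0 ≠ [] := by
    intro hh; have := congrArg List.length hh; simp [innF] at this; omega
  have hinnl : innF rl ≠ [] := by
    intro hh; have := congrArg List.length hh; simp [innF] at this; omega
  simp only [stepA, List.map_append, List.map_cons, List.map_nil, List.cons_append,
    List.nil_append, List.headD_cons, List.tail_cons, reduceIte, hinn, ne_eq,
    not_false_eq_true, if_true, dropLast_cons_concat, getLastD_cons_concat,
    List.getLastD_cons, List.dropLast_cons₂, List.append_eq_nil_iff, getLastD_concat',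
    headD_append_ne_nil _ _ hinnl, tail_append_ne_nil _ _ hinnl]
  rw [if_pos (by simp)]
  refine congrArg₂ _ ?_ (congrArg₂ _ ?_ ?_)
  · rw [rowA r0 (by omega), rowB rl (by omega)]
  · rw [rowD rl (by omega),
      show List.map hdF mrs ++ [hdF rl] = List.map hdF (mrs ++ [rl]) by simp,
      map_eq_headD_cons hdF (mrs ++ [rl]) (by simp) []]
    simp
  · rw [rowE r0 (by omega),
      show lstF (mrs.getLastD r0) = lstF ((r0 :: mrs).getLastD []) by rw [List.getLastD_cons],
      ← map_eq_dropLast_concat lstF (r0 :: mrs) (by simp) []]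
    simp

theorem len2_tail_tail (r : List Int) (h : r.length = 2) : r.tail.tail = [] := by
  match r, h with | [a, b], _ => rfl

theorem len2_dropLast_dropLast (r : List Int) (h : r.length = 2) : r.dropLast.dropLast = [] := by
  match r, h with | [a, b], _ => rfl

theorem stepA_rotate_two (r0 rl : List Int) (mrs : List (List Int))
    (h0 : r0.length = 2) (hl : rl.length = 2) :
    stepA (((r0 :: mrs ++ [rl]).map innF), ((r0 :: mrs ++ [rl]).map hdF),
        ((r0 :: mrs ++ [rl]).map lstF)) "Rotate" =
      (r0.dropLast.dropLast :: mrs.map innF ++ [rl.tail.tail],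
       hdF ((mrs ++ [rl]).headD []) :: (mrs ++ [rl]).tail.map hdF ++ [rl.tail.headD 0],
       r0.dropLast.getLastD 0 :: (r0 :: mrs).dropLast.map lstF ++ [lstF ((r0 :: mrs).getLastD [])]) := by
  have hinn : innF r0 = [] := len2_nil r0 h0
  have hinnl : innF rl = [] := len2_nil rl hl
  simp only [stepA, List.map_append, List.map_cons, List.map_nil, List.cons_append,
    List.headD_cons, List.tail_cons, reduceIte, hinn, hinnl, ne_eq,
    not_true_eq_false, if_false, dropLast_cons_concat, getLastD_cons_concat,
    List.getLastD_cons, List.dropLast_cons₂, getLastD_concat']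
  refine congrArg₂ _ ?_ (congrArg₂ _ ?_ ?_)
  · rw [len2_dropLast_dropLast r0 h0, len2_tail_tail rl hl]
  · rw [show rl.tail.headD 0 = lstF rl from by rw [lstF]; exact len2_tail_headD rl hl,
      show List.map hdF mrs ++ [hdF rl] = List.map hdF (mrs ++ [rl]) by simp,
      map_eq_headD_cons hdF (mrs ++ [rl]) (by simp) []]
    simp
  · rw [show r0.dropLast.getLastD 0 = hdF r0 from by rw [hdF]; exact len2_dropLast_getLastD r0 h0 0,
      show lstF (mrs.getLastD r0) = lstF ((r0 :: mrs).getLastD []) by rw [List.getLastD_cons],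
      ← map_eq_dropLast_concat lstF (r0 :: mrs) (by simp) []]
    simp

theorem pyDequeRotate1_map (f : List Int → Int) (rows : List (List Int)) (h : rows ≠ []) :
    pyDequeRotate1 (rows.map f) = f (rows.getLast h) :: rows.dropLast.map f := by
  rw [pyDequeRotate1, List.getLast?_map, List.getLast?_eq_some_getLast (l := rows) h]
  simp [← List.map_dropLast]

theorem pyDequeRotate1_map' (f : List Int → List Int) (rows : List (List Int)) (h : rows ≠ []) :
    pyDequeRotate1 (rows.map f) = f (rows.getLast h) :: rows.dropLast.map f := by
  rw [pyDequeRotate1, List.getLast?_map, List.getLast?_eq_some_getLast (l := rows) h]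
  simp [← List.map_dropLast]

theorem stepB_shift (rows : List (List Int)) (op : String) (hop : ¬ op = "Rotate")
    (h : rows ≠ []) :
    stepB rows op = rows.getLast h :: rows.dropLast := by
  rw [stepB, if_neg hop, PySem.List.slice_from_neg_one, PySem.List.slice_to_neg_one,
    List.drop_length_sub_one h]
  rfl

theorem step_commute (m : Nat) (rows : List (List Int)) (op : String)
    (hn : 2 ≤ rows.length) (hm : 2 ≤ m) (hs : ∀ r ∈ rows, r.length = m) :
    stepA (rows.map innF, rows.map hdF, rows.map lstF) op =
      ((stepB rows op).map innF, (stepB rows op).map hdF, (stepB rows op).map lstF) := by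
  by_cases hop : op = "Rotate"
  · subst hop
    obtain ⟨r0, rest, rfl⟩ : ∃ r0 rest, rows = r0 :: rest := by
      cases rows with
      | nil => simp at hn
      | cons a t => exact ⟨a, t, rfl⟩
    obtain ⟨mrs, rl, rfl⟩ : ∃ mrs rl, rest = mrs ++ [rl] := by
      rcases List.eq_nil_or_concat rest with h | ⟨mrs, rl, hc⟩
      · subst h; simp at hn
      · exact ⟨mrs, rl, by simp [hc]⟩
    have h0 : r0.length = m := hs r0 (by simp)
    have hl : rl.length = m := hs rl (by simp)
    by_cases hm3 : 3 ≤ m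
    · refine (stepA_rotate_big m r0 rl mrs hm3 h0 hl).trans ?_
      exact congrArg₂ _ (stepB_map_innF r0 rl mrs).symm
        (congrArg₂ _ (stepB_map_hdF r0 rl mrs (by omega)).symm
          (stepB_map_lstF r0 rl mrs (by omega)).symm)
    · have hm2 : m = 2 := by omega
      refine (stepA_rotate_two r0 rl mrs (by omega) (by omega)).trans ?_
      exact congrArg₂ _ (stepB_map_innF r0 rl mrs).symm
        (congrArg₂ _ (stepB_map_hdF r0 rl mrs (by omega)).symm
          (stepB_map_lstF r0 rl mrs (by omega)).symm)
  · have hne : rows ≠ [] := by intro hh; subst hh; simp at hn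
    rw [stepB_shift rows op hop hne]
    simp only [stepA, if_neg hop]
    rw [pyDequeRotate1_map' innF rows hne, pyDequeRotate1_map hdF rows hne,
      pyDequeRotate1_map lstF rows hne]
    simp

theorem stepB_shape (m : Nat) (rows : List (List Int)) (op : String)
    (hn : 2 ≤ rows.length) (hm : 2 ≤ m) (hs : ∀ r ∈ rows, r.length = m) :
    (stepB rows op).length = rows.length ∧ ∀ r ∈ stepB rows op, r.length = m := by
  by_cases hop : op = "Rotate"
  · subst hop
    obtain ⟨r0, rest, rfl⟩ : ∃ r0 rest, rows = r0 :: rest := by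
      cases rows with
      | nil => simp at hn
      | cons a t => exact ⟨a, t, rfl⟩
    obtain ⟨mrs, rl, rfl⟩ : ∃ mrs rl, rest = mrs ++ [rl] := by
      rcases List.eq_nil_or_concat rest with h | ⟨mrs, rl, hc⟩
      · subst h; simp at hn
      · exact ⟨mrs, rl, by simp [hc]⟩
    have h0 : r0.length = m := hs r0 (by simp)
    have hl : rl.length = m := hs rl (by simp)
    constructor
    · rw [stepB_rotate]
      simp [PySem.List.length_pyRange_one]
    · intro r hr
      rw [stepB_rotate] at hr
      simp only [List.mem_cons, List.mem_append, List.mem_map, List.mem_singleton,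
        List.not_mem_nil, or_false] at hr
      rcases hr with h | ⟨i, hi, rfl⟩ | h
      · subst h
        simp [h0]
        omega
      · rw [PySem.List.mem_pyRange_one] at hi
        simp only [List.length_cons, List.length_append, List.length_nil] at hi
        have hget : PySem.List.pyGetD (r0 :: (mrs ++ [rl])) i [] ∈ r0 :: (mrs ++ [rl]) := by
          rw [PySem.List.pyGetD_eq_getElem _ []
            (by omega)
            (by simp only [List.length_cons, List.length_append, List.length_nil]; omega)]
          exact List.getElem_mem _
        have := hs _ hget
        simp [innF, this]
        omega
      · subst h
        rw [show ((r0 : List Int) :: (mrs ++ [rl])).getLastD [] = rl by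
          rw [List.getLastD_eq_getLast?]
          rw [show r0 :: (mrs ++ [rl]) = (r0 :: mrs) ++ [rl] by simp]
          rw [List.getLast?_concat]
          rfl]
        simp [hl]
        omega
  · have hne : rows ≠ [] := by intro hh; subst hh; simp at hn
    rw [stepB_shift rows op hop hne]
    constructor
    · simp
      omega
    · intro r hr
      simp only [List.mem_cons] at hr
      rcases hr with rfl | hr
      · exact hs _ (List.getLast_mem hne)
      · exact hs _ (List.dropLast_subset _ hr)

theorem step_commute_shift (rows : List (List Int)) (op : String) (hop : ¬ op = "Rotate") :
    stepA (rows.map innF, rows.map hdF, rows.map lstF) op =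
      ((stepB rows op).map innF, (stepB rows op).map hdF, (stepB rows op).map lstF) := by
  cases rows with
  | nil =>
      rw [stepB, if_neg hop]
      simp only [stepA, if_neg hop]
      rfl
  | cons a t =>
      have hne : (a :: t) ≠ [] := by simp
      rw [stepB_shift (a :: t) op hop hne]
      simp only [stepA, if_neg hop]
      rw [pyDequeRotate1_map' innF (a :: t) hne, pyDequeRotate1_map hdF (a :: t) hne,
        pyDequeRotate1_map lstF (a :: t) hne]
      simp

theorem stepB_shift_mem (rows : List (List Int)) (op : String) (hop : ¬ op = "Rotate") :
    ∀ r ∈ stepB rows op, r ∈ rows := by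
  intro r hr
  rw [stepB, if_neg hop] at hr
  simp only [List.mem_append] at hr
  rcases hr with h | h
  · exact PySem.List.mem_of_mem_slice _ _ _ h
  · exact PySem.List.mem_of_mem_slice _ _ _ h

theorem fold_commute_shift (ops : List String) (hops : "Rotate" ∉ ops) :
    ∀ rows : List (List Int), (∀ r ∈ rows, 2 ≤ r.length) →
      ops.foldl stepA (rows.map innF, rows.map hdF, rows.map lstF) =
        ((ops.foldl stepB rows).map innF, (ops.foldl stepB rows).map hdF,
         (ops.foldl stepB rows).map lstF) ∧
      ∀ r ∈ ops.foldl stepB rows, 2 ≤ r.length := by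
  induction ops with
  | nil => intro rows hs; exact ⟨rfl, hs⟩
  | cons op ops ih =>
      intro rows hs
      have hop : ¬ op = "Rotate" := by intro hh; exact hops (by simp [hh])
      have hops' : "Rotate" ∉ ops := fun hh => hops (by simp [hh])
      have hs' : ∀ r ∈ stepB rows op, 2 ≤ r.length :=
        fun r hr => hs r (stepB_shift_mem rows op hop r hr)
      simp only [List.foldl_cons, step_commute_shift rows op hop]
      exact ih hops' (stepB rows op) hs'

theorem fold_commute (m : Nat) (ops : List String) :
    ∀ rows : List (List Int), 2 ≤ rows.length → 2 ≤ m → (∀ r ∈ rows, r.length = m) →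
      ops.foldl stepA (rows.map innF, rows.map hdF, rows.map lstF) =
        ((ops.foldl stepB rows).map innF, (ops.foldl stepB rows).map hdF,
         (ops.foldl stepB rows).map lstF) ∧
      2 ≤ (ops.foldl stepB rows).length ∧ ∀ r ∈ ops.foldl stepB rows, r.length = m := by
  induction ops with
  | nil => intro rows hn hm hs; exact ⟨rfl, hn, hs⟩
  | cons op ops ih =>
      intro rows hn hm hs
      obtain ⟨hlen, hrows⟩ := stepB_shape m rows op hn hm hs
      have := ih (stepB rows op) (by omega) hm hrows
      simp only [List.foldl_cons, step_commute m rows op hn hm hs]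
      exact this

theorem solution_eq_alt (rc : List (List Int)) (operations : List String)
    (h2 : ∀ r ∈ rc, 2 ≤ r.length)
    (hrect : (2 ≤ rc.length ∧ ∀ r ∈ rc, r.length = (rc.headD []).length) ∨
      "Rotate" ∉ operations) :
    solution rc operations = solution_alt rc operations := by
  rw [solution, solution_alt, List.map_id, init_eq rc ([], [], [])]
  simp only [List.nil_append]
  rcases hrect with ⟨hn, hs⟩ | hops
  · have hm : 2 ≤ (rc.headD []).length := by
      cases rc with
      | nil => simp at hn
      | cons a t => exact h2 a (by simp)
    obtain ⟨hfold, hlen, hshape⟩ := fold_commute (rc.headD []).length operations rc hn hm hs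
    rw [hfold]
    exact recomb (operations.foldl stepB rc)
      (fun r hr => by rw [hshape r hr]; exact hm)
  · obtain ⟨hfold, hshape⟩ := fold_commute_shift operations hops rc h2
    rw [hfold]
    exact recomb (operations.foldl stepB rc) hshape

-- ===== VERDICT (by name: the statement is the Claim_ definition above) =====
theorem solution_spec : Claim_equal_solution := by
  intro rc operations _ hpre
  unfold Spec_solution
  exact solution_eq_alt rc operations hpre.1 hpre.2
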